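-- pv_equiv track=rewrite | github.com/NineSixFourteen/Hons | src/main/java/Benchmarks/Prog1/Prog1.py | makeMultiList
-- ===== SOURCE A (Python) =====
-- def makeMultiList(size):
--     LayerOne = list()
--     for i in range(0,size):
--         LayerTwo = list()
--         for j in range(0,size):
--             LayerThree = list()
--             for k in range(0,size):
--                 LayerFour = list()
--                 for l in range(0, size):
--                     LayerFive = list()
--                     for m in range(0,size):
--                         x = [[] for i in range(10)]
--                         LayerFive.append(x)
--                     LayerFour.append(LayerFive)
--                 LayerThree.append(LayerFour)
--             LayerTwo.append(LayerThree)
--         LayerOne.append(LayerTwo)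
--     return LayerOne
-- ===== SOURCE B (Python) =====
-- def makeMultiList(size):
--     def build(d):
--         if d == 0:
--             return [[] for _ in range(10)]
--         return [build(d - 1) for _ in range(size)]
--     return build(5)
-- ===== Notes on version B (the rewrite author's own statement) =====
-- stated objective: simpler
-- what changed: Replaces the five explicit nested loops with append accumulators by a single recursion over the nesting depth that builds each level as a comprehension.
import Mathlib
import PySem

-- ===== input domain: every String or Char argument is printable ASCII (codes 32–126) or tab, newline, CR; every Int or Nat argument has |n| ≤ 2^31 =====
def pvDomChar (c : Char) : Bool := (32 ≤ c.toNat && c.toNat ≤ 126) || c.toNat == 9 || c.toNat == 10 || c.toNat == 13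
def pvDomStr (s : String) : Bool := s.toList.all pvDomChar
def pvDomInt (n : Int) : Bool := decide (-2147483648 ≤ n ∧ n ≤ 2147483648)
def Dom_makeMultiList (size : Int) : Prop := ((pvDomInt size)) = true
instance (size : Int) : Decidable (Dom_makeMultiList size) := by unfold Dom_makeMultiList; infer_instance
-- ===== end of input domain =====

-- B recursively builds the same structure over the nesting depth instead of A's five nested
-- append loops; objective: simpler.

-- ===== PORT A =====
-- literal transliteration: five nested 'for … append' loops, innermost list comprehension
def makeMultiList (size : Int) : List (List (List (List (List (List (List Int)))))) :=
  (PySem.List.pyRange 0 size 1).foldl (fun layerOne _i =>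
    layerOne ++ [(PySem.List.pyRange 0 size 1).foldl (fun layerTwo _j =>
      layerTwo ++ [(PySem.List.pyRange 0 size 1).foldl (fun layerThree _k =>
        layerThree ++ [(PySem.List.pyRange 0 size 1).foldl (fun layerFour _l =>
          layerFour ++ [(PySem.List.pyRange 0 size 1).foldl (fun layerFive _m =>
            layerFive ++ [(PySem.List.pyRange 0 10 1).map (fun _ => ([] : List Int))]) []]) []]) []]) []]) []

-- ===== PORT B =====
-- Source B's build(d) recursion returns a differently-typed list at each depth, so the depth
-- recursion is unrolled into one helper per depth (build0 = leaf, buildK = comprehension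
-- over range(size) of build(K-1)); each helper is the literal body of build at that depth.
def pvBuild0 : List (List Int) := (PySem.List.pyRange 0 10 1).map (fun _ => ([] : List Int))
def pvBuild1 (size : Int) : List (List (List Int)) := (PySem.List.pyRange 0 size 1).map (fun _ => pvBuild0)
def pvBuild2 (size : Int) : List (List (List (List Int))) := (PySem.List.pyRange 0 size 1).map (fun _ => pvBuild1 size)
def pvBuild3 (size : Int) : List (List (List (List (List Int)))) := (PySem.List.pyRange 0 size 1).map (fun _ => pvBuild2 size)
def pvBuild4 (size : Int) : List (List (List (List (List (List Int))))) := (PySem.List.pyRange 0 size 1).map (fun _ => pvBuild3 size)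
def makeMultiList_alt (size : Int) : List (List (List (List (List (List (List Int)))))) :=
  (PySem.List.pyRange 0 size 1).map (fun _ => pvBuild4 size)

-- ===== PRECONDITION & SPEC =====
abbrev ML7 : Type := List (List (List (List (List (List (List Int))))))
def Spec_makeMultiList (size : Int) (out : List (List (List (List (List (List (List Int))))))) : Prop := out = makeMultiList_alt size
instance (size : Int) (out : ML7) : Decidable (Spec_makeMultiList size out) := by unfold Spec_makeMultiList; infer_instance

-- ===== CLAIM =====
def Claim_equal_makeMultiList : Prop := ∀ (size : Int), Dom_makeMultiList size → Spec_makeMultiList size (makeMultiList size)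

-- ===== LEMMAS AND PROOFS =====

-- ===== VERDICT =====
theorem makeMultiList_spec : Claim_equal_makeMultiList := by
  intro size _
  unfold Spec_makeMultiList makeMultiList makeMultiList_alt pvBuild4 pvBuild3 pvBuild2 pvBuild1 pvBuild0
  simp
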